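-- pv_equiv track=rewrite | github.com/JiashuLiu/University-Projects | Computational Algebra/assignment8.py | count_degree
-- ===== SOURCE A (Python) =====
-- def count_degree(lis):
--     """
--     Función auxiliar. Devuelve el grado del polinomio (en formato lista de coeficientes) recibido como parámetro.
--     """
--     if all(x == 0 for x in lis):
--         return 0
--     else:
--         n = len(lis)
--         pos = len(lis)
--         i = 0
--         while lis[pos-1] == 0:
--             pos-=1
--             i+=1
--         return n-i
-- ===== SOURCE B (Python) =====
-- def count_degree(lis):
--     last = -1
--     for idx, x in enumerate(lis):
--         if x != 0:
--             last = idx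
--     return last + 1
-- ===== Notes on version B (the rewrite author's own statement) =====
-- stated objective: simpler
-- what changed: Replaces A's all-zero pre-pass plus backward while-loop over trailing zeros with a single forward scan that tracks the last nonzero index and returns it plus one.
import Mathlib
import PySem

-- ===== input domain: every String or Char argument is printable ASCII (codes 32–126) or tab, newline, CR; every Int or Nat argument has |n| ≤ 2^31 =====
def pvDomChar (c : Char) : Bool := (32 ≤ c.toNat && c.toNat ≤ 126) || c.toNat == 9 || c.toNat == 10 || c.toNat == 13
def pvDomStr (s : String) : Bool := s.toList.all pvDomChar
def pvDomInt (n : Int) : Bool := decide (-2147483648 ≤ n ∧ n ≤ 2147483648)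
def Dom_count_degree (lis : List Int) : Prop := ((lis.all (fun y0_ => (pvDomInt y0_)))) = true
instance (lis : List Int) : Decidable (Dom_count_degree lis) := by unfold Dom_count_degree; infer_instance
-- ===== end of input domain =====

-- B replaces A's all-zero pre-pass plus backward trailing-zero while-loop with one forward scan
-- tracking the last nonzero index (objective: simpler). Return values only; neither mutates.

-- ===== PORT A =====
-- A's while loop 'while lis[pos-1] == 0: pos -= 1; i += 1; return n - i', run with pos = n, i = 0.
-- pos (> 0 throughout, since some element is nonzero) is the recursion fuel; lis[pos-1] = lis.getD (pos-1)
-- with an in-range index, so getD with any default is exact here.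
def countLoopA (lis : List Int) : Nat → Nat → Int
  | 0, i => (lis.length : Int) - (i : Int)          -- unreachable when some element is nonzero
  | pos + 1, i =>
      if lis.getD pos 1 = 0 then countLoopA lis pos (i + 1)
      else (lis.length : Int) - (i : Int)

def count_degree (lis : List Int) : Int :=
  if lis.all (fun x => x == 0) then 0
  else countLoopA lis lis.length 0

-- ===== PORT B =====
-- last = -1; for idx, x in enumerate(lis): if x != 0: last = idx; return last + 1
def count_degree_alt (lis : List Int) : Int :=
  (PySem.List.enumerate lis 0 |>.foldl (fun last p => if p.2 ≠ 0 then p.1 else last) (-1 : Int)) + 1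

-- ===== PRECONDITION & SPEC =====
def Spec_count_degree (lis : List Int) (out : Int) : Prop := out = count_degree_alt lis
instance (lis : List Int) (out : Int) : Decidable (Spec_count_degree lis out) := by unfold Spec_count_degree; infer_instance

-- ===== CLAIM (what is proved, stated in full; the proofs are below) =====
def Claim_equal_count_degree : Prop := ∀ (lis : List Int), Dom_count_degree lis → Spec_count_degree lis (count_degree lis)

-- ===== LEMMAS AND PROOFS =====

-- the i parameter only offsets the result
theorem countLoopA_shift (lis : List Int) (pos i : Nat) :
    countLoopA lis pos (i + 1) = countLoopA lis pos i - 1 := by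
  induction pos generalizing i with
  | zero => simp [countLoopA]; ring
  | succ p ih =>
      simp only [countLoopA]
      split
      · exact ih (i + 1)
      · push_cast; ring

-- appending one element does not change the indices the loop reads (pos ≤ xs.length), only the length
theorem countLoopA_append (xs : List Int) (y : Int) (pos i : Nat) (h : pos ≤ xs.length) :
    countLoopA (xs ++ [y]) pos i = countLoopA xs pos i + 1 := by
  induction pos generalizing i with
  | zero => simp [countLoopA]; push_cast; ring
  | succ p ih =>
      have hp : p < xs.length := h
      simp only [countLoopA, List.getD_append _ _ _ _ hp, List.length_append]
      split
      · exact ih (i + 1) (Nat.le_of_lt hp)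
      · simp; push_cast; ring

theorem alt_snoc (xs : List Int) (y : Int) :
    count_degree_alt (xs ++ [y]) =
      if y ≠ 0 then (xs.length : Int) + 1 else count_degree_alt xs := by
  simp only [count_degree_alt, PySem.List.enumerate_append, List.foldl_append]
  simp [PySem.List.enumerate]
  split <;> simp_all

theorem a_snoc (xs : List Int) (y : Int) :
    count_degree (xs ++ [y]) =
      if y ≠ 0 then (xs.length : Int) + 1 else count_degree xs := by
  by_cases hy : y = 0
  · subst hy
    simp only [ne_eq, not_true_eq_false, if_false]
    by_cases hall : xs.all (fun x => x == 0)
    · have : (xs ++ [(0:Int)]).all (fun x => x == 0) := by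
        simp [List.all_append, hall]
      simp [count_degree, hall, this]
    · have : ¬ (xs ++ [(0:Int)]).all (fun x => x == 0) := by
        simp_all [List.all_append]
      simp only [count_degree, if_neg this, if_neg hall, List.length_append,
        List.length_cons, List.length_nil]
      -- first loop step reads index xs.length, value 0
      have step : countLoopA (xs ++ [0]) (xs.length + 1) 0
          = countLoopA (xs ++ [0]) xs.length 1 := by
        simp [countLoopA, List.getD_append_right]
      rw [step, countLoopA_append xs 0 xs.length 1 (le_refl _),
          countLoopA_shift xs xs.length 0]
      ring
  · have : ¬ (xs ++ [y]).all (fun x => x == 0) := by simp [List.all_append, hy]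
    simp only [count_degree, if_neg this, ne_eq, hy]
    simp [countLoopA, hy]

theorem eq_all (lis : List Int) : count_degree lis = count_degree_alt lis := by
  induction lis using List.reverseRecOn with
  | nil => simp [count_degree, count_degree_alt, PySem.List.enumerate]
  | append_singleton xs y ih =>
      rw [a_snoc, alt_snoc]
      split
      · rfl
      · exact ih

-- ===== VERDICT (by name: the statement is the Claim_ definition above) =====
theorem count_degree_spec : Claim_equal_count_degree := by
  intro lis _
  exact eq_all lis
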